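-- pv_equiv track=rewrite | github.com/emilydumas/mcs275spring2023 | projects/proj2solution/chiseler.py | all_winning_strategies
-- ===== SOURCE A (Python) =====
-- def share_letter(w1, w2):
--     "Determine whether there is a character common to strings `w1` and `w2`"
--     for c in w1:
--         if c in w2:
--             return True
--     return False
--
-- def all_winning_strategies(L, moves_so_far=None):
--     """
--     Find a winning strategy to the word chiseler game where the current state
--     is `L` and `moves_so_far` contains the list of words removed thus far.
--     """
--
--     if moves_so_far == None:
--         moves_so_far = []
--
--     # Exactly one winning strategy for a one-word game
--     # consisting of the moves so far, followed by removal
--     # of that last word.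
--     if len(L) == 1:
--         return [moves_so_far + [L[0]]]
--
--     if not share_letter(L[0], L[-1]):
--         # No shared letter = this game has no winning strategies
--         return []
--
--     # Two next moves are possible, so find:
--     # 1. Strategies where the next move is to remove first word
--     strats_first = all_winning_strategies(L[1:], moves_so_far + [L[0]])
--     # 2. Strategies where the next move is to remove last word
--     strats_last = all_winning_strategies(L[:-1], moves_so_far + [L[-1]])
--     # Return all the strategies found.
--     return strats_first + strats_last
-- ===== SOURCE B (Python) =====
-- def all_winning_strategies(L, moves_so_far=None):
--     """
--     Bottom-up interval DP: compute the list of winning tail-strategies for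
--     every contiguous interval exactly once, merging adjacent row entries,
--     then prepend the moves made so far.
--     """
--     prefix = [] if moves_so_far is None else moves_so_far
--     # one row entry per interval: (first word, last word, tail strategies)
--     row = [(w, w, [[w]]) for w in L]
--     while len(row) > 1:
--         row = [
--             (f1, l2,
--              ([[f1] + t for t in t2] + [[l2] + t for t in t1])
--              if any(c in l2 for c in f1) else [])
--             for (f1, l1, t1), (f2, l2, t2) in zip(row, row[1:])
--         ]
--     return [prefix + t for t in row[0][2]]
-- ===== Notes on version B (the rewrite author's own statement) =====
-- stated objective: alternative
-- what changed: Replaces the top-down double recursion on (sub-game, moves-so-far) by a bottom-up interval dynamic program: a row of (first word, last word, tail-strategies) entries, one per contiguous interval, is repeatedly merged pairwise until one entry remains, and the moves-so-far prefix is prepended once at the end; it trades A's top-down pruning of unreachable intervals for computing each interval exactly once.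
import Mathlib
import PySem

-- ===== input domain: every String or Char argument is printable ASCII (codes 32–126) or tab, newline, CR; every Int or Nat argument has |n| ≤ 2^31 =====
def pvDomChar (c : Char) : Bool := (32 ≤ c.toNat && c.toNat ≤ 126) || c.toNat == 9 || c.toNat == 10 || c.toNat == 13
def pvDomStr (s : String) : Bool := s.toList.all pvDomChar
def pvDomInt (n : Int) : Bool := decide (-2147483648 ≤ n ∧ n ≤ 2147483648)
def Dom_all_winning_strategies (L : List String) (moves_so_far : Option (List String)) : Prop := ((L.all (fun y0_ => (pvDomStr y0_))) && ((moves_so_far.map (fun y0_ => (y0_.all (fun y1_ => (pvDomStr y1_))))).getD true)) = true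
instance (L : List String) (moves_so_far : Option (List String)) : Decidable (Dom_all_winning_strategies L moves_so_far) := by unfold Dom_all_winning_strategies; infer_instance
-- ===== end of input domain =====

-- B replaces A's top-down double recursion by a bottom-up interval DP (a row of
-- (first, last, tail-strategies) entries merged pairwise); alternative algorithm, not claimed faster.

-- ===== PORT A =====
-- share_letter: for c in w1: if c in w2: return True / return False
def shareLetter (w1 w2 : String) : Bool :=
  w1.toList.any (fun c => w2.toList.contains c)

-- A's recursion, after the `moves_so_far == None` normalisation to []
def awsA (L : List String) (moves : List String) : List (List String) :=
  if L.length = 1 then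
    [moves ++ [L.headD ""]]
  else
    match L with
    | [] => []  -- Python raises IndexError here (share_letter(L[0], L[-1])); excluded by Pre_
    | a :: rest =>
      let lastw := (a :: rest).getLast (List.cons_ne_nil a rest)
      if shareLetter a lastw then
        awsA rest (moves ++ [a]) ++ awsA ((a :: rest).dropLast) (moves ++ [lastw])
      else []
termination_by L.length
decreasing_by
  · simp
  · simp

def all_winning_strategies (L : List String) (moves_so_far : Option (List String)) : List (List String) :=
  awsA L (moves_so_far.getD [])

-- ===== PORT B =====
-- one merge of adjacent row entries: the zip(row, row[1:]) comprehension of Source B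
def stepRow : List (String × String × List (List String)) → List (String × String × List (List String))
  | (f1, _, t1) :: (f2, l2, t2) :: rest =>
      (f1, l2,
        if f1.toList.any (fun c => l2.toList.contains c) then
          (t2.map (fun t => f1 :: t)) ++ (t1.map (fun t => l2 :: t))
        else [])
        :: stepRow ((f2, l2, t2) :: rest)
  | _ => []

-- needed by reduceRow's termination proof
theorem stepRow_length (row : List (String × String × List (List String))) :
    (stepRow row).length = row.length - 1 := by
  match row with
  | [] => simp [stepRow]
  | [e] => simp [stepRow]
  | (f1, l1, t1) :: (f2, l2, t2) :: rest =>
      simp [stepRow, stepRow_length ((f2, l2, t2) :: rest)]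

-- while len(row) > 1: row = stepRow row
def reduceRow (row : List (String × String × List (List String))) :
    List (String × String × List (List String)) :=
  if 1 < row.length then reduceRow (stepRow row) else row
termination_by row.length
decreasing_by rw [stepRow_length]; omega

def all_winning_strategies_alt (L : List String) (moves_so_far : Option (List String)) : List (List String) :=
  let pfx := moves_so_far.getD []
  match reduceRow (L.map (fun w => (w, w, [[w]]))) with
  | (_, _, ts) :: _ => ts.map (fun t => pfx ++ t)
  | [] => []  -- Python raises IndexError (row[0] on empty input); excluded by Pre_

-- ===== PRECONDITION & SPEC =====
-- Pre_ excludes exactly the empty list, on which the Python A raises IndexError.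
def Pre_all_winning_strategies (L : List String) (moves_so_far : Option (List String)) : Prop :=
  L ≠ []
instance (L : List String) (moves_so_far : Option (List String)) : Decidable (Pre_all_winning_strategies L moves_so_far) := by unfold Pre_all_winning_strategies; infer_instance

def pvWitness_all_winning_strategies : List String × Option (List String) := (["ab", "bc"], none)

def Spec_all_winning_strategies (L : List String) (moves_so_far : Option (List String)) (out : List (List String)) : Prop := out = all_winning_strategies_alt L moves_so_far
instance (L : List String) (moves_so_far : Option (List String)) (out : List (List String)) : Decidable (Spec_all_winning_strategies L moves_so_far out) := by unfold Spec_all_winning_strategies; infer_instance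

-- ===== CLAIM (what is proved, stated in full; the proofs are below) =====
def Claim_equal_all_winning_strategies : Prop := ∀ (L : List String) (moves_so_far : Option (List String)), Dom_all_winning_strategies L moves_so_far → Pre_all_winning_strategies L moves_so_far → Spec_all_winning_strategies L moves_so_far (all_winning_strategies L moves_so_far)

-- ===== LEMMAS AND PROOFS =====

-- the intended content of a row entry for a window W of L
def entryE (W : List String) : String × String × List (List String) :=
  (W.headD "", W.getLastD "", awsA W [])

-- the row of entries for all length-k windows of L, by start position
def rowSpec (k : Nat) (L : List String) : List (String × String × List (List String)) :=
  if 0 < k ∧ k ≤ L.length then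
    entryE (L.take k) :: rowSpec k L.tail
  else []
termination_by L.length
decreasing_by
  cases L with
  | nil => simp_all; omega
  | cons a t => simp

theorem awsA_prefix (n : Nat) : ∀ (L : List String), L.length = n → ∀ (moves : List String),
    awsA L moves = (awsA L []).map (fun t => moves ++ t) := by
  induction n using Nat.strong_induction_on with
  | _ n IH =>
    intro L hL moves
    rw [awsA.eq_def, awsA.eq_def]
    by_cases h1 : L.length = 1
    · simp [h1]
    · simp only [h1, if_false]
      cases L with
      | nil => simp
      | cons a rest =>
        simp only []
        by_cases hs : shareLetter a ((a :: rest).getLast (List.cons_ne_nil a rest))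
        · simp only [hs, if_true]
          have hr := IH rest.length (by simp at hL ⊢; omega) rest rfl
          have hd := IH ((a :: rest).dropLast).length (by simp at hL ⊢; omega) ((a :: rest).dropLast) rfl
          rw [hr, hd, hr ([] ++ [a]), hd ([] ++ [(a :: rest).getLast (List.cons_ne_nil a rest)])]
          simp [List.map_map, Function.comp_def]
        · simp [hs]

theorem awsA_pre (L moves : List String) :
    awsA L moves = (awsA L []).map (fun t => moves ++ t) :=
  awsA_prefix L.length L rfl moves

theorem lastD_cons (a : String) (l : List String) (h : l ≠ []) :
    (a :: l).getLastD "" = l.getLastD "" := by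
  cases l with
  | nil => simp at h
  | cons b u => simp

theorem getLast_eq_getLastD (l : List String) (h : l ≠ []) : l.getLast h = l.getLastD "" := by
  rw [List.getLastD_eq_getLast?, List.getLast?_eq_some_getLast h]
  rfl

theorem take_ne_nil (m : Nat) (t : List String) (h : m + 1 ≤ t.length) : t.take (m+1) ≠ [] := by
  apply List.ne_nil_of_length_pos
  simp
  omega

theorem rowSpec_cons (k : Nat) (L : List String) (h1 : 0 < k) (h2 : k ≤ L.length) :
    rowSpec k L = entryE (L.take k) :: rowSpec k L.tail := by
  rw [rowSpec.eq_def]; simp [h1, h2]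

theorem rowSpec_nil (k : Nat) (L : List String) (h : ¬ (0 < k ∧ k ≤ L.length)) :
    rowSpec k L = [] := by
  rw [rowSpec.eq_def]; simp only [if_neg h]

theorem rowSpec_init (L : List String) :
    L.map (fun w => (w, w, [[w]])) = rowSpec 1 L := by
  induction L with
  | nil => rw [rowSpec_nil 1 [] (by simp)]; rfl
  | cons a t ih =>
      rw [rowSpec_cons 1 (a :: t) (by omega) (by simp)]
      have h1 : awsA [a] [] = [[a]] := by rw [awsA.eq_def]; simp
      simp [entryE, h1, ih]

theorem rowSpec_length (k : Nat) (L : List String) (h1 : 0 < k) (h2 : k ≤ L.length) :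
    (rowSpec k L).length = L.length - k + 1 := by
  induction L with
  | nil => simp at h2; omega
  | cons a t ih =>
      rw [rowSpec_cons k (a :: t) h1 h2]
      by_cases h3 : k ≤ t.length
      · simp only [List.length_cons, List.tail_cons, ih h3]; omega
      · simp only [List.length_cons, List.tail_cons]
        rw [rowSpec_nil k t (by tauto)]
        simp at h2 h3 ⊢
        omega

theorem entry_merge (a : String) (t : List String) (m : Nat) (h : m + 1 ≤ t.length) :
    entryE (a :: t.take (m+1)) =
      (a, (t.take (m+1)).getLastD "",
        if (a.toList.any fun c => ((t.take (m+1)).getLastD "").toList.contains c) = true then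
          ((awsA (t.take (m+1)) []).map (fun s => a :: s)) ++
            ((awsA (a :: t.take m) []).map (fun s => (t.take (m+1)).getLastD "" :: s))
        else []) := by
  have hne : t.take (m+1) ≠ [] := take_ne_nil m t h
  have hlen : (t.take (m+1)).length = m + 1 := by simp; omega
  unfold entryE
  refine Prod.ext ?_ (Prod.ext ?_ ?_)
  · simp
  · exact lastD_cons a (t.take (m+1)) hne
  · simp only []
    rw [awsA.eq_def]
    have h1 : ¬ ((a :: t.take (m+1)).length = 1) := by simp [hlen]
    simp only [h1, if_false]
    have hgl : (a :: t.take (m+1)).getLast (List.cons_ne_nil _ _) = (t.take (m+1)).getLastD "" := by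
      rw [getLast_eq_getLastD, lastD_cons a (t.take (m+1)) hne]
    have hdl : (a :: t.take (m+1)).dropLast = a :: t.take m := by
      rw [show (a :: t.take (m+1)) = (a :: t).take (m+2) from (List.take_succ_cons).symm]
      rw [List.dropLast_eq_take]
      have hl2 : ((a :: t).take (m+2)).length = m + 2 := by simp; omega
      rw [hl2, List.take_take, show min (m + 2 - 1) (m+2) = m + 1 by omega]
      exact List.take_succ_cons
    simp only [hgl, hdl, shareLetter]
    split_ifs with hs
    · rw [awsA_pre (t.take (m+1)) ([] ++ [a]), awsA_pre (a :: t.take m) ([] ++ [(t.take (m+1)).getLastD ""])]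
      simp
    · rfl

theorem stepRow_rowSpec (m : Nat) (L : List String) :
    stepRow (rowSpec (m+1) L) = rowSpec (m+2) L := by
  induction L with
  | nil =>
      rw [rowSpec_nil (m+1) [] (by simp), rowSpec_nil (m+2) [] (by simp)]
      rfl
  | cons a t ih =>
      by_cases hbig : m + 2 ≤ (a :: t).length
      · have h2 : m + 1 ≤ t.length := by simp at hbig ⊢; omega
        rw [rowSpec_cons (m+1) (a :: t) (by omega) (by simp; omega),
            List.tail_cons,
            rowSpec_cons (m+1) t (by omega) h2,
            rowSpec_cons (m+2) (a :: t) (by omega) hbig,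
            List.tail_cons, ← ih,
            rowSpec_cons (m+1) t (by omega) h2]
        simp only [entryE, stepRow, List.take_succ_cons, List.headD_cons]
        congr 1
        have hm := entry_merge a t m h2
        simp only [entryE, List.headD_cons] at hm
        exact hm.symm
      · rw [rowSpec_nil (m+2) (a :: t) (by simp at hbig ⊢; omega)]
        by_cases hk : m + 1 ≤ (a :: t).length
        · rw [rowSpec_cons (m+1) (a :: t) (by omega) hk, List.tail_cons,
              rowSpec_nil (m+1) t (by simp at hbig; omega)]
          rfl
        · rw [rowSpec_nil (m+1) (a :: t) (by tauto)]
          rfl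

theorem reduceRow_rowSpec (L : List String) : ∀ (d k : Nat), 1 ≤ k → k ≤ L.length →
    L.length - k = d → reduceRow (rowSpec k L) = [entryE L] := by
  intro d
  induction d with
  | zero =>
      intro k h1 h2 h3
      have hk : k = L.length := by omega
      subst hk
      rw [rowSpec_cons L.length L h1 h2, List.take_length,
          rowSpec_nil L.length L.tail (by rw [List.length_tail]; omega)]
      rw [reduceRow.eq_def]
      simp
  | succ d ihd =>
      intro k h1 h2 h3
      have hlen : (rowSpec k L).length = L.length - k + 1 := rowSpec_length k L h1 h2
      rw [reduceRow.eq_def, if_pos (by rw [hlen]; omega)]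
      obtain ⟨m, rfl⟩ : ∃ m, k = m + 1 := ⟨k - 1, by omega⟩
      rw [stepRow_rowSpec m L]
      exact ihd (m + 2) (by omega) (by omega) (by omega)

-- ===== VERDICT (by name: the statement is the Claim_ definition above) =====
theorem all_winning_strategies_spec : Claim_equal_all_winning_strategies := by
  intro L msf _dom hpre
  unfold Spec_all_winning_strategies all_winning_strategies all_winning_strategies_alt
  have hlen : 1 ≤ L.length := by
    cases L with
    | nil => exact absurd rfl hpre
    | cons a t => simp
  rw [rowSpec_init, reduceRow_rowSpec L (L.length - 1) 1 le_rfl hlen rfl]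
  simp only [entryE]
  exact awsA_pre L (msf.getD [])
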